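-- pv_equiv track=rewrite | github.com/rtsoliday/git-svn-sync | git-svn-sync.py | extract_last_svn_log_message
-- ===== SOURCE A (Python) =====
-- def extract_last_svn_log_message(log_output: str) -> str:
--     """
--     Parses `svn log -l 1` output to pull the commit message (between the first dashed separators).
--     """
--     lines = [l.rstrip("\n") for l in log_output.splitlines()]
--     sep_indices = [i for i, l in enumerate(lines) if l.startswith("-" * 5)]
--     if len(sep_indices) >= 2:
--         start = sep_indices[0] + 2  # line after header line (author|date|rev)
--         end = sep_indices[1]
--         body = "\n".join(lines[start:end]).strip()
--         return body
--     # Fallback: entire output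
--     return log_output.strip()
-- ===== SOURCE B (Python) =====
-- def extract_last_svn_log_message(log_output: str) -> str:
--     """Single streaming scan: start buffering at the first dashed separator,
--     stop at the second; drop the header line from the buffer."""
--     buf = None  # None = first separator not yet seen
--     for raw in log_output.splitlines():
--         line = raw.rstrip("\n")
--         if line.startswith("-----"):
--             if buf is None:
--                 buf = []  # start collecting after the first separator
--             else:
--                 # second separator reached: buf[0] is the header line
--                 return "\n".join(buf[1:]).strip()
--         elif buf is not None:
--             buf.append(line)
--     return log_output.strip()
-- ===== Notes on version B (the rewrite author's own statement) =====
-- stated objective: alternative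
-- what changed: Replaced the enumerate/filter separator-index list plus slicing with a single streaming state-machine scan that starts buffering at the first dashed separator and returns as soon as the second one is seen.
import Mathlib
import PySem

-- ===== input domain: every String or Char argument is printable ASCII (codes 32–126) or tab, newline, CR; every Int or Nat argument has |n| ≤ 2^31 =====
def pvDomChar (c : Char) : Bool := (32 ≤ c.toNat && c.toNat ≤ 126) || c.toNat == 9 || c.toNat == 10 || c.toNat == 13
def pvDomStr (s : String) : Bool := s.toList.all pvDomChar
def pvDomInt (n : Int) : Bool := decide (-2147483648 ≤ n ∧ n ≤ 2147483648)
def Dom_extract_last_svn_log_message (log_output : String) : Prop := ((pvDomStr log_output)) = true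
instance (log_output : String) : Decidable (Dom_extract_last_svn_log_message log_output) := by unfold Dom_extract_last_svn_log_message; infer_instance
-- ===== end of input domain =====

-- B replaces A's separator-index list + slicing by one streaming scan that stops at the second separator (alternative decomposition, same cost).

-- l.rstrip("\n") ported by hand (PySem has no one-sided strip with a char set): drop trailing '\n' characters; exact.
def pvRstripNL (s : String) : String := String.ofList ((s.toList.reverse.dropWhile (· == '\n')).reverse)

-- ===== PORT A =====
def extract_last_svn_log_message (log_output : String) : String :=
  let lines := (PySem.Str.splitlines log_output).map pvRstripNL
  let sep_indices := ((PySem.List.enumerate lines 0).filter (fun p => PySem.Str.startswith p.2 "-----")).map (·.1)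
  if sep_indices.length ≥ 2 then
    -- sep_indices[0] / sep_indices[1] cannot fail under the length guard; pyGetD is used with a dummy default
    let start := PySem.List.pyGetD sep_indices 0 0 + 2
    let stop := PySem.List.pyGetD sep_indices 1 0
    PySem.Str.strip (PySem.Str.join "\n" (PySem.List.slice lines (some start) (some stop)))
  else
    PySem.Str.strip log_output

-- ===== PORT B =====
-- state machine: buf = none before the first separator, some b while collecting
def pvScanB : List String → Option (List String) → String → String
  | [], _, orig => PySem.Str.strip orig
  | raw :: rest, buf, orig =>
    let line := pvRstripNL raw
    if PySem.Str.startswith line "-----" then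
      match buf with
      | none => pvScanB rest (some []) orig
      | some b => PySem.Str.strip (PySem.Str.join "\n" (b.drop 1))
    else
      match buf with
      | none => pvScanB rest none orig
      | some b => pvScanB rest (some (b ++ [line])) orig

def extract_last_svn_log_message_alt (log_output : String) : String :=
  pvScanB (PySem.Str.splitlines log_output) none log_output

-- ===== PRECONDITION & SPEC =====
def Spec_extract_last_svn_log_message (log_output : String) (out : String) : Prop := out = extract_last_svn_log_message_alt log_output
instance (log_output : String) (out : String) : Decidable (Spec_extract_last_svn_log_message log_output out) := by unfold Spec_extract_last_svn_log_message; infer_instance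

-- ===== CLAIM (what is proved, stated in full; the proofs are below) =====
def Claim_equal_extract_last_svn_log_message : Prop := ∀ (log_output : String), Dom_extract_last_svn_log_message log_output → Spec_extract_last_svn_log_message log_output (extract_last_svn_log_message log_output)

-- ===== LEMMAS AND PROOFS =====

-- Nat-valued separator positions of a (rstripped) line list
def pvSepsN : List String → List Nat
  | [] => []
  | l :: ls =>
    let r := (pvSepsN ls).map (· + 1)
    if PySem.Str.startswith l "-----" then 0 :: r else r

theorem pvSeps_bridge (ls : List String) (s : Int) :
    ((PySem.List.enumerate ls s).filter (fun p => PySem.Str.startswith p.2 "-----")).map (·.1)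
      = (pvSepsN ls).map (fun k => s + (k : Nat)) := by
  induction ls generalizing s with
  | nil => simp [pvSepsN, PySem.List.enumerate_nil]
  | cons l ls ih =>
    simp only [PySem.Str.startswith_eq] at ih
    simp only [PySem.List.enumerate_cons, List.filter_cons, pvSepsN, PySem.Str.startswith_eq]
    by_cases h : PySem.Chars.startswith l.toList "-----".toList = true
    · simp only [h, if_true, List.map_cons, ih, List.map_map, Function.comp_def]
      refine congrArg₂ _ (by simp) (List.map_congr_left fun k _ => by push_cast; ring)
    · rw [Bool.not_eq_true] at h
      simp only [h, Bool.false_eq_true, if_false, ih, List.map_map, Function.comp_def]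
      exact List.map_congr_left fun k _ => by push_cast; ring

-- Phase 2: after the first separator, scanning with buffer buf
theorem pvScanB_some (raws : List String) (buf : List String) (orig : String) :
    pvScanB raws (some buf) orig =
      match pvSepsN (raws.map pvRstripNL) with
      | k1 :: _ => PySem.Str.strip (PySem.Str.join "\n" ((buf ++ (raws.map pvRstripNL).take k1).drop 1))
      | [] => PySem.Str.strip orig := by
  induction raws generalizing buf with
  | nil => simp [pvScanB, pvSepsN]
  | cons raw rest ih =>
    simp only [List.map_cons, pvSepsN, pvScanB, PySem.Str.startswith_eq]
    by_cases h : PySem.Chars.startswith (pvRstripNL raw).toList "-----".toList = true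
    · simp only [h, if_true]
      simp
    · rw [Bool.not_eq_true] at h
      simp only [h, Bool.false_eq_true, if_false, ih]
      cases hs : pvSepsN (rest.map pvRstripNL) with
      | nil => simp
      | cons k1 tl => simp [List.append_assoc]

-- Phase 1: before the first separator
theorem pvScanB_none (raws : List String) (orig : String) :
    pvScanB raws none orig =
      match pvSepsN (raws.map pvRstripNL) with
      | k0 :: k1 :: _ =>
          PySem.Str.strip (PySem.Str.join "\n" (((raws.map pvRstripNL).drop (k0 + 2)).take (k1 - (k0 + 2))))
      | _ => PySem.Str.strip orig := by
  induction raws with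
  | nil => simp [pvScanB, pvSepsN]
  | cons raw rest ih =>
    simp only [List.map_cons, pvSepsN, pvScanB, PySem.Str.startswith_eq]
    by_cases h : PySem.Chars.startswith (pvRstripNL raw).toList "-----".toList = true
    · simp only [h, if_true]
      rw [pvScanB_some]
      cases hs : pvSepsN (rest.map pvRstripNL) with
      | nil => simp
      | cons k1 tl =>
        simp only [List.map_cons, List.nil_append, List.drop_succ_cons]
        have hdt : ((rest.map pvRstripNL).take k1).drop 1 = ((rest.map pvRstripNL).drop 1).take (k1 - 1) := by
          rw [List.drop_take]
        simp [hdt]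
    · rw [Bool.not_eq_true] at h
      simp only [h, Bool.false_eq_true, if_false, ih]
      cases hs : pvSepsN (rest.map pvRstripNL) with
      | nil => simp
      | cons k0 tl =>
        cases tl with
        | nil => simp
        | cons k1 tl2 =>
          simp only [List.map_cons, List.drop_succ_cons]
          have h1 : k0 + 1 + 2 = (k0 + 2) + 1 := by omega
          have h2 : k1 + 1 - (k0 + 1 + 2) = k1 - (k0 + 2) := by omega
          simp [h1, h2]

-- ===== VERDICT (by name: the statement is the Claim_ definition above) =====
theorem extract_last_svn_log_message_spec : Claim_equal_extract_last_svn_log_message := by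
  intro log_output _
  unfold Spec_extract_last_svn_log_message extract_last_svn_log_message extract_last_svn_log_message_alt
  rw [pvScanB_none]
  simp only [pvSeps_bridge]
  cases hs : pvSepsN ((PySem.Str.splitlines log_output).map pvRstripNL) with
  | nil => simp
  | cons k0 tl =>
    cases tl with
    | nil => simp
    | cons k1 tl' =>
      simp only [List.map_cons, List.length_cons]
      have hlen : ((tl'.map fun k => (0 : Int) + (k : Nat)).length + 1 + 1) ≥ 2 := by omega
      simp only [if_pos hlen]
      have hc : (0:Int) ≤ (tl'.length : Int) + 1 := by positivity
      have g0 : PySem.List.pyGetD (((0:Int) + (k0:Nat)) :: ((0:Int) + (k1:Nat)) :: tl'.map (fun k => (0:Int) + (k:Nat))) 0 0 = (k0 : Int) := by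
        simp [PySem.List.pyGetD, PySem.List.pyGet?, PySem.List.pyIdx?, hc]
      have g1 : PySem.List.pyGetD (((0:Int) + (k0:Nat)) :: ((0:Int) + (k1:Nat)) :: tl'.map (fun k => (0:Int) + (k:Nat))) 1 0 = (k1 : Int) := by
        simp [PySem.List.pyGetD, PySem.List.pyGet?, PySem.List.pyIdx?]
      rw [g0, g1]
      have hcast : (k0 : Int) + 2 = ((k0 + 2 : Nat) : Int) := by push_cast; ring
      rw [hcast, PySem.List.slice_natCast]
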